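-- pv_equiv track=rewrite | github.com/brihijoshi/iterative-feature-normalisation-ICASSP-2011 | code/feature_extraction.py | get_voiced_segments
-- ===== SOURCE A (Python) =====
-- def get_voiced_segments(contour):
-- 	voiced_segments = []
-- 	segment_values = []
-- 	for elem in contour:
-- 	    if elem == 0:
-- 	        if len(segment_values)>0:
-- 	            voiced_segments.append(segment_values)
-- 	            segment_values = []
-- 	    else:
-- 	        segment_values.append(elem)
-- 	return voiced_segments
-- ===== SOURCE B (Python) =====
-- def get_voiced_segments(contour):
--     contour = list(contour)
--     zeros = [i for i, v in enumerate(contour) if v == 0]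
--     voiced_segments = []
--     prev = -1
--     for z in zeros:
--         seg = contour[prev + 1:z]
--         if len(seg) > 0:
--             voiced_segments.append(seg)
--         prev = z
--     return voiced_segments
-- ===== Notes on version B (the rewrite author's own statement) =====
-- stated objective: alternative
-- what changed: Replaces A's element-by-element accumulator state machine with a build-the-zero-index-list-then-slice-between-consecutive-delimiters decomposition; nothing after the last zero is sliced, which reproduces A's dropping of the trailing run.
import Mathlib
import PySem

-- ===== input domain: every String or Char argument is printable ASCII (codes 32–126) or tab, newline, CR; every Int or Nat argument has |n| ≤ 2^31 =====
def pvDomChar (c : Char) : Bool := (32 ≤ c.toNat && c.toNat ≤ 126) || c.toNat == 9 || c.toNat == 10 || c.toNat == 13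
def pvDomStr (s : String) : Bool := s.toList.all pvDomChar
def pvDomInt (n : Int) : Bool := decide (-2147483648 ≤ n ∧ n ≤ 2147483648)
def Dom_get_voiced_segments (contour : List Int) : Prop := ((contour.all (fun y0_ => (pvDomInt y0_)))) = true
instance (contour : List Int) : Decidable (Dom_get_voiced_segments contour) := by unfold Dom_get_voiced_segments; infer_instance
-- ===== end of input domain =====

-- B replaces A's one-pass accumulator state machine by collecting the zero indices and slicing
-- between consecutive delimiters (objective: alternative decomposition, same cost).

-- ===== PORT A =====
def pvStepA (st : List (List Int) × List Int) (elem : Int) : List (List Int) × List Int :=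
  if elem == 0 then
    (if st.2.length > 0 then (st.1 ++ [st.2], ([] : List Int)) else st)
  else (st.1, st.2 ++ [elem])

def get_voiced_segments (contour : List Int) : List (List Int) :=
  (contour.foldl pvStepA ([], [])).1

-- ===== PORT B =====
def pvStepB (contour : List Int) (st : List (List Int) × Int) (z : Int) : List (List Int) × Int :=
  let seg := PySem.List.slice contour (some (st.2 + 1)) (some z)
  (if seg.length > 0 then st.1 ++ [seg] else st.1, z)

def get_voiced_segments_alt (contour : List Int) : List (List Int) :=
  let zeros := ((PySem.List.enumerate contour 0).filter (fun p => p.2 == 0)).map (fun p => p.1)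
  (zeros.foldl (pvStepB contour) ([], -1)).1

-- ===== PRECONDITION & SPEC =====
def Spec_get_voiced_segments (contour : List Int) (out : List (List Int)) : Prop := out = get_voiced_segments_alt contour
instance (contour : List Int) (out : List (List Int)) : Decidable (Spec_get_voiced_segments contour out) := by unfold Spec_get_voiced_segments; infer_instance

-- ===== CLAIM (what is proved, stated in full; the proofs are below) =====
def Claim_equal_get_voiced_segments : Prop := ∀ (contour : List Int), Dom_get_voiced_segments contour → Spec_get_voiced_segments contour (get_voiced_segments contour)

-- ===== LEMMAS AND PROOFS =====

-- reference function: R l seg = the segments A emits on the rest l with pending segment seg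
def pvR : List Int → List Int → List (List Int)
  | [], _ => []
  | x :: t, seg => if x = 0 then (if seg = [] then pvR t [] else seg :: pvR t []) else pvR t (seg ++ [x])

-- zero indices of l when enumeration starts at s
def pvZ (s : Int) (l : List Int) : List Int :=
  ((PySem.List.enumerate l s).filter (fun p => p.2 == 0)).map (fun p => p.1)

theorem pvZ_nil (s : Int) : pvZ s [] = [] := rfl

theorem pvZ_cons (s : Int) (x : Int) (t : List Int) :
    pvZ s (x :: t) = (if x = 0 then [s] else []) ++ pvZ (s + 1) t := by
  simp only [pvZ, PySem.List.enumerate_cons, List.filter_cons]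
  by_cases hx : x = 0 <;> simp [hx]

theorem foldA_spec (l : List Int) (acc : List (List Int)) (seg : List Int) :
    (l.foldl pvStepA (acc, seg)).1 = acc ++ pvR l seg := by
  induction l generalizing acc seg with
  | nil => simp [pvR]
  | cons x t ih =>
    by_cases hx : x = 0
    · subst hx
      by_cases hs : seg = []
      · subst hs; simp [pvStepA, pvR, ih]
      · have : seg.length > 0 := List.length_pos_iff.mpr hs
        simp [pvStepA, pvR, hs, this, ih]
    · simp [pvStepA, pvR, hx, ih]

theorem foldB_spec (c : List Int) (t : List Int) (n m : Nat) (acc : List (List Int))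
    (ht : t = c.drop n) (hmn : m ≤ n) :
    ((pvZ (n : Int) t).foldl (pvStepB c) (acc, (m : Int) - 1)).1
      = acc ++ pvR t ((c.drop m).take (n - m)) := by
  induction t generalizing n m acc with
  | nil => simp [pvZ_nil, pvR]
  | cons x t' ih =>
    have hn : n < c.length := by
      by_contra h
      have hd : c.drop n = [] := List.drop_eq_nil_of_le (by omega)
      rw [hd] at ht; exact (List.cons_ne_nil _ _) ht
    have ht' : t' = c.drop (n + 1) := by
      have := congrArg List.tail ht
      simpa [List.tail_drop] using this
    have hz : ((n : Int) + 1) = ((n + 1 : Nat) : Int) := by push_cast; ring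
    by_cases hx : x = 0
    · subst hx
      have hzl : pvZ (n : Int) (0 :: t') = (n : Int) :: pvZ ((n : Int) + 1) t' := by
        rw [pvZ_cons]; simp
      have hstep : pvStepB c (acc, (m : Int) - 1) (n : Int)
          = (if ((c.drop m).take (n - m)).length > 0
              then acc ++ [(c.drop m).take (n - m)] else acc, (n : Int)) := by
        simp only [pvStepB]
        have harg : (m : Int) - 1 + 1 = (m : Int) := by ring
        rw [harg, PySem.List.slice_natCast]
      have hprev : (n : Int) = ((n + 1 : Nat) : Int) - 1 := by push_cast; ring
      rw [hzl, List.foldl_cons, hstep]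
      conv_lhs => rw [hprev]
      have hfix : ((n + 1 : Nat) : Int) - 1 + 1 = ((n + 1 : Nat) : Int) := by ring
      rw [hfix, ih (n + 1) (n + 1) _ ht' (le_refl _)]
      simp only [Nat.sub_self, List.take_zero, pvR]
      by_cases hs : (c.drop m).take (n - m) = []
      · simp [hs]
      · have hl : ((c.drop m).take (n - m)).length > 0 := List.length_pos_iff.mpr hs
        rw [List.length_take, List.length_drop] at hl
        have h1 : m < n ∧ m < c.length := by omega
        simp [hs, h1]
    · rw [pvZ_cons]
      simp only [if_neg hx, List.nil_append]
      rw [hz, ih (n + 1) m acc ht' (by omega)]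
      have hlen : ((c.drop m).take (n - m)).length = n - m := by
        rw [List.length_take, List.length_drop]; omega
      have hsplit : c.drop m = (c.drop m).take (n - m) ++ (x :: t') := by
        have h1 := List.take_append_drop (n - m) (c.drop m)
        rw [List.drop_drop] at h1
        have h2 : m + (n - m) = n := by omega
        rw [h2, ← ht] at h1
        exact h1.symm
      have hpend : (c.drop m).take (n + 1 - m) = (c.drop m).take (n - m) ++ [x] := by
        conv_lhs => rw [hsplit]
        rw [List.take_append, hlen, List.take_take]
        have e1 : n + 1 - m - (n - m) = 1 := by omega
        have e2 : min (n + 1 - m) (n - m) = n - m := by omega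
        rw [e1, e2, List.take_one]
        simp
      rw [hpend, pvR, if_neg hx]

-- ===== VERDICT (by name: the statement is the Claim_ definition above) =====
theorem get_voiced_segments_spec : Claim_equal_get_voiced_segments := by
  intro contour _
  unfold Spec_get_voiced_segments get_voiced_segments get_voiced_segments_alt
  rw [foldA_spec contour [] []]
  have h := foldB_spec contour contour 0 0 [] (by simp) (le_refl _)
  simp only [Nat.cast_zero, List.drop_zero, Nat.sub_self, List.take_zero] at h
  have : (0 : Int) - 1 = -1 := by ring
  rw [this] at h
  exact h.symm
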